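-- pv_equiv track=rewrite | github.com/seyahdoo/advent-of-code-2023 | day_03/day_three_part_two.py | is_touching
-- ===== SOURCE A (Python) =====
-- def is_touching(lines, number_position, gear_position):
--     i = number_position[0]
--     j = number_position[1]
--     length = number_position[2]
--
--     x_low = i - 1
--     x_high = i + 1
--     y_low = j - 1
--     y_high = j + length
--
--     for i in range(x_low, x_high + 1):
--         for j in range(y_low, y_high + 1):
--             if i == gear_position[0] and j == gear_position[1]:
--                 return True
--     return False
-- ===== SOURCE B (Python) =====
-- def is_touching(lines, number_position, gear_position):
--     i, j, length = number_position
--     return (i - 1 <= gear_position[0] <= i + 1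
--             and j - 1 <= gear_position[1] <= j + length)
-- ===== Notes on version B (the rewrite author's own statement) =====
-- stated objective: simpler
-- what changed: Replaced the nested scan over the (x_low..x_high)x(y_low..y_high) box with a closed-form chained-inequality bounds check; no iteration at all.
import Mathlib
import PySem

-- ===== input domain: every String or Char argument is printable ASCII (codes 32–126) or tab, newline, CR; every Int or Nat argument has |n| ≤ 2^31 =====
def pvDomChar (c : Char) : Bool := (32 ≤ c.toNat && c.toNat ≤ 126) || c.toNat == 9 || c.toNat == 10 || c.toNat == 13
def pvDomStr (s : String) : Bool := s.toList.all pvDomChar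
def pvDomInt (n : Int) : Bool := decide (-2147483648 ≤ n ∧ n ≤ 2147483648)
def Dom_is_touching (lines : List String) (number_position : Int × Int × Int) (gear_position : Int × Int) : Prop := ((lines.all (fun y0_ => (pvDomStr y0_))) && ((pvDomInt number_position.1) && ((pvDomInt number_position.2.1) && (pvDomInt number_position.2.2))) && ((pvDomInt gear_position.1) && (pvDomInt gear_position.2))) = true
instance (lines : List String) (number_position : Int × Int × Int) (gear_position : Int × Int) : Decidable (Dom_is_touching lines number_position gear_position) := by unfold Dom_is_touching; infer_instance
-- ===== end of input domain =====

-- B replaces A's nested scan over the box with a closed-form chained-inequality bounds check (simpler, O(1)).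

-- ===== PORT A =====
-- A scans i over range(x_low, x_high+1) and j over range(y_low, y_high+1), returning True at the
-- first match (early return ≡ List.any) and False after the loops.
def is_touching (lines : List String) (number_position : Int × Int × Int) (gear_position : Int × Int) : Bool :=
  let i := number_position.1
  let j := number_position.2.1
  let length := number_position.2.2
  let x_low := i - 1
  let x_high := i + 1
  let y_low := j - 1
  let y_high := j + length
  (PySem.List.pyRange x_low (x_high + 1) 1).any (fun i =>
    (PySem.List.pyRange y_low (y_high + 1) 1).any (fun j =>
      i == gear_position.1 && j == gear_position.2))

-- ===== PORT B =====
def is_touching_alt (lines : List String) (number_position : Int × Int × Int) (gear_position : Int × Int) : Bool :=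
  let i := number_position.1
  let j := number_position.2.1
  let length := number_position.2.2
  (i - 1 ≤ gear_position.1 && gear_position.1 ≤ i + 1) &&
  (j - 1 ≤ gear_position.2 && gear_position.2 ≤ j + length)

-- ===== PRECONDITION & SPEC =====
def Spec_is_touching (lines : List String) (number_position : Int × Int × Int) (gear_position : Int × Int) (out : Bool) : Prop := out = is_touching_alt lines number_position gear_position
instance (lines : List String) (number_position : Int × Int × Int) (gear_position : Int × Int) (out : Bool) : Decidable (Spec_is_touching lines number_position gear_position out) := by unfold Spec_is_touching; infer_instance

-- ===== CLAIM (what is proved, stated in full; the proofs are below) =====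
def Claim_equal_is_touching : Prop := ∀ (lines : List String) (number_position : Int × Int × Int) (gear_position : Int × Int), Dom_is_touching lines number_position gear_position → Spec_is_touching lines number_position gear_position (is_touching lines number_position gear_position)

-- ===== LEMMAS AND PROOFS =====

-- ===== VERDICT (by name: the statement is the Claim_ definition above) =====
theorem is_touching_spec : Claim_equal_is_touching := by
  intro lines np gp _
  unfold Spec_is_touching is_touching is_touching_alt
  rw [Bool.eq_iff_iff]
  simp only [List.any_eq_true, PySem.List.mem_pyRange_one, Bool.and_eq_true, beq_iff_eq,
    decide_eq_true_eq]
  constructor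
  · rintro ⟨x, ⟨hx1, hx2⟩, y, ⟨hy1, hy2⟩, hxe, hye⟩
    subst hxe hye
    refine ⟨⟨by omega, by omega⟩, by omega, by omega⟩
  · rintro ⟨⟨h1, h2⟩, h3, h4⟩
    exact ⟨gp.1, ⟨by omega, by omega⟩, gp.2, ⟨by omega, by omega⟩, rfl, rfl⟩
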